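-- pv_equiv track=rewrite | github.com/vasilypht/crypto-methods | crypto-methods/methods/symmetric/playfair.py | split_into_bigrams
-- ===== SOURCE A (Python) =====
-- def split_into_bigrams(text: str, alphabet: str):
--     indices = []
--     letters = ""
--
--     for i, letter in enumerate(text):
--         if letter.lower() in alphabet:
--             letters += letter
--             indices.append(i)
--
--     bigrams = [letters[i:i + 2] for i in range(0, len(letters), 2)]
--     return bigrams, indices
-- ===== SOURCE B (Python) =====
-- def split_into_bigrams(text: str, alphabet: str):
--     bigrams = []
--     indices = []
--     buf = None
--     for i, letter in enumerate(text):
--         if letter.lower() in alphabet: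
--             indices.append(i)
--             if buf is None:
--                 buf = letter
--             else:
--                 bigrams.append(buf + letter)
--                 buf = None
--     if buf is not None:
--         bigrams.append(buf)
--     return bigrams, indices
-- ===== Notes on version B (the rewrite author's own statement) =====
-- stated objective: faster
-- what changed: B emits bigrams in the same single pass that filters the text, pairing kept letters through a one-slot buffer and flushing a leftover letter at the end, instead of first building the full filtered string via repeated += and then slicing it into chunks of two.
import Mathlib
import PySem

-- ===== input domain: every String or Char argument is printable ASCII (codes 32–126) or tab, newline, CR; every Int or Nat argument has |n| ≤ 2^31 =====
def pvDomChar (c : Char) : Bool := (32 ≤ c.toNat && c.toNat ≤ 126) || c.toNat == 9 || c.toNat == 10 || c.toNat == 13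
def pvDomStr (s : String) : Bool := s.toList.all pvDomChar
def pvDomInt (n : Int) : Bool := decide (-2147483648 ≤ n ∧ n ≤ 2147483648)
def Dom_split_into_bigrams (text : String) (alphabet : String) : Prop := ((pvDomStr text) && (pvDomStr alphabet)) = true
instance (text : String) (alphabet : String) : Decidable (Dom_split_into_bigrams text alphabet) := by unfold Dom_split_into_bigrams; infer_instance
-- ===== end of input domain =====

-- B interleaves bigram formation into the single filtering pass via a one-slot buffer,
-- instead of building the whole filtered string and slicing it into chunks of two afterwards.


-- ===== PORT A =====
-- filter loop collecting (indices, letters), then bigrams = [letters[i:i+2] for i in range(0, len(letters), 2)]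
def split_into_bigrams (text : String) (alphabet : String) : List String × List Int :=
  let st := (PySem.List.enumerate text.toList 0).foldl
    (fun (st : List Int × List Char) p =>
      if PySem.Str.isIn (PySem.Str.lower (String.ofList [p.2])) alphabet
      then (st.1 ++ [p.1], st.2 ++ [p.2]) else st) ([], [])
  let letters := st.2
  let bigrams := (PySem.List.pyRange 0 (letters.length : Int) 2).map
    (fun i => String.ofList (PySem.List.slice letters (some i) (some (i + 2))))
  (bigrams, st.1)

-- ===== PORT B =====
-- single pass: a one-slot buffer (Option Char) pairs kept letters; leftover flushed after the loop
def split_into_bigrams_alt (text : String) (alphabet : String) : List String × List Int :=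
  let st := (PySem.List.enumerate text.toList 0).foldl
    (fun (st : List String × List Int × Option Char) p =>
      if PySem.Str.isIn (PySem.Str.lower (String.ofList [p.2])) alphabet then
        match st.2.2 with
        | none => (st.1, st.2.1 ++ [p.1], some p.2)
        | some b => (st.1 ++ [String.ofList [b, p.2]], st.2.1 ++ [p.1], none)
      else st) ([], [], none)
  match st.2.2 with
  | none => (st.1, st.2.1)
  | some b => (st.1 ++ [String.ofList [b]], st.2.1)

-- ===== PRECONDITION & SPEC =====
def Spec_split_into_bigrams (text : String) (alphabet : String) (out : List String × List Int) : Prop := out = split_into_bigrams_alt text alphabet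
instance (text : String) (alphabet : String) (out : List String × List Int) : Decidable (Spec_split_into_bigrams text alphabet out) := by unfold Spec_split_into_bigrams; infer_instance

-- ===== CLAIM (what is proved, stated in full; the proofs are below) =====
def Claim_equal_split_into_bigrams : Prop := ∀ (text : String) (alphabet : String), Dom_split_into_bigrams text alphabet → Spec_split_into_bigrams text alphabet (split_into_bigrams text alphabet)

-- ===== LEMMAS AND PROOFS =====

-- A's bigram comprehension, reduced to chunks of two
def chunk2 : List Char → List String
  | [] => []
  | [a] => [String.ofList [a]]
  | a :: b :: r => String.ofList [a, b] :: chunk2 r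

-- bigrams produced by B's buffer while scanning the kept letters
def pairs : Option Char → List Char → List String
  | _, [] => []
  | none, c :: r => pairs (some c) r
  | some b, c :: r => String.ofList [b, c] :: pairs none r

-- buffer content after scanning the kept letters
def lastBuf : Option Char → List Char → Option Char
  | buf, [] => buf
  | none, _ :: r => lastBuf (some ‹Char›) r
  | some _, _ :: r => lastBuf none r

theorem foldA_eq (q : Int × Char → Bool) :
    ∀ (l : List (Int × Char)) (ind : List Int) (ls : List Char),
    l.foldl (fun (st : List Int × List Char) p =>
        if q p then (st.1 ++ [p.1], st.2 ++ [p.2]) else st) (ind, ls)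
      = (ind ++ (l.filter q).map (·.1), ls ++ (l.filter q).map (·.2))
  | [], ind, ls => by simp
  | p :: r, ind, ls => by
    by_cases h : q p <;>
      simp [h, foldA_eq q r, List.append_assoc]

theorem foldB_eq (q : Int × Char → Bool) :
    ∀ (l : List (Int × Char)) (bigs : List String) (ind : List Int) (buf : Option Char),
    l.foldl (fun (st : List String × List Int × Option Char) p =>
        if q p then
          match st.2.2 with
          | none => (st.1, st.2.1 ++ [p.1], some p.2)
          | some b => (st.1 ++ [String.ofList [b, p.2]], st.2.1 ++ [p.1], none)
        else st) (bigs, ind, buf)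
      = (bigs ++ pairs buf ((l.filter q).map (·.2)),
         ind ++ (l.filter q).map (·.1),
         lastBuf buf ((l.filter q).map (·.2)))
  | [], bigs, ind, buf => by simp [pairs, lastBuf]
  | p :: r, bigs, ind, buf => by
    by_cases h : q p
    · cases buf <;>
        simp [h, foldB_eq q r, pairs, lastBuf, List.append_assoc]
    · simp [h, foldB_eq q r]

theorem chunk2_eq_pairs_flush : ∀ (cs : List Char),
    chunk2 cs = pairs none cs ++
      (match lastBuf none cs with | none => ([] : List String) | some b => [String.ofList [b]])
  | [] => rfl
  | [a] => rfl
  | a :: b :: r => by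
    simp [chunk2, pairs, lastBuf, chunk2_eq_pairs_flush r]

theorem rangeChunk : ∀ (cs : List Char),
    (List.range ((cs.length + 1) / 2)).map (fun k => String.ofList ((cs.drop (2 * k)).take 2))
      = chunk2 cs
  | [] => rfl
  | [a] => by simp [chunk2]
  | a :: b :: r => by
    have hlen : ((a :: b :: r).length + 1) / 2 = (r.length + 1) / 2 + 1 := by
      simp; omega
    rw [hlen, List.range_succ_eq_map, List.map_cons, List.map_map]
    refine congrArg₂ _ rfl ?_
    rw [← rangeChunk r]
    refine List.map_congr_left (fun k _ => ?_)
    have : 2 * (k + 1) = 2 * k + 1 + 1 := by omega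
    simp [Function.comp, this, List.drop_succ_cons]

theorem slice_two (cs : List Char) (k : Nat) :
    PySem.List.slice cs (some ((0 : Int) + 2 * ↑k)) (some ((0 : Int) + 2 * ↑k + 2))
      = (cs.drop (2 * k)).take 2 := by
  have h1 : ((0 : Int) + 2 * (k : Int)) = ((2 * k : Nat) : Int) := by push_cast; ring
  rw [h1, show ((2 * k : Nat) : Int) + 2 = ((2 * k : Nat) : Int) + ((2 : Nat) : Int) from by norm_num,
    PySem.List.slice_natCast_add]

theorem bigA (cs : List Char) :
    (PySem.List.pyRange 0 (cs.length : Int) 2).map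
      (fun i => String.ofList (PySem.List.slice cs (some i) (some (i + 2)))) = chunk2 cs := by
  rw [PySem.List.pyRange_of_pos _ _ (by norm_num), List.map_map]
  have hm : (if (0 : Int) < (cs.length : Int)
      then (((cs.length : Int) - 0 + 2 - 1) / 2).toNat else 0) = (cs.length + 1) / 2 := by
    split <;> omega
  rw [hm, ← rangeChunk cs]
  refine List.map_congr_left (fun k _ => ?_)
  simp only [Function.comp]
  rw [slice_two]

-- ===== VERDICT (by name: the statement is the Claim_ definition above) =====
theorem split_into_bigrams_spec : Claim_equal_split_into_bigrams := by
  intro text alphabet _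
  unfold Spec_split_into_bigrams split_into_bigrams split_into_bigrams_alt
  rw [foldA_eq, foldB_eq]
  simp only [List.nil_append]
  rw [bigA, chunk2_eq_pairs_flush]
  cases lastBuf none (((PySem.List.enumerate text.toList 0).filter _).map (·.2)) <;> simp
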